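-- pv_equiv track=rewrite | github.com/pypi-data/pypi-mirror-398 | packages/iobrpy/iobrpy-0.1.7.tar.gz/iobrpy-0.1.7/src/iobrpy/workflow/trust4.py | _infer_sample_from_fastq_name
-- ===== SOURCE A (Python) =====
-- from typing import Dict, List, Optional, Tuple
--
-- def _infer_sample_from_fastq_name(filename: str) -> Optional[Tuple[str, str]]:
--     """
--     Return (sample_prefix, end_type) where end_type is 'R1' or 'R2',
--     based on suffixes '_1.fastq.gz' / '_2.fastq.gz' or '_1.fq.gz' / '_2.fq.gz'.
--     If not matched, return None.
--     """
--     suffixes = [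
--         ("_1.fastq.gz", "R1"),
--         ("_2.fastq.gz", "R2"),
--         ("_1.fq.gz", "R1"),
--         ("_2.fq.gz", "R2"),
--     ]
--
--     for suffix, read_type in suffixes:
--         if filename.endswith(suffix):
--             return (filename[: -len(suffix)], read_type)
--     return None
-- ===== SOURCE B (Python) =====
-- def _infer_sample_from_fastq_name(filename):
--     # two-level decomposition: extension first, then read-end suffix
--     for ext in (".fastq.gz", ".fq.gz"):
--         if filename.endswith(ext):
--             base = filename[: -len(ext)]
--             if base.endswith("_1"):
--                 return (base[:-2], "R1")
--             if base.endswith("_2"):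
--                 return (base[:-2], "R2")
--             return None
--     return None
-- ===== Notes on version B (the rewrite author's own statement) =====
-- stated objective: simpler
-- what changed: B factors the match into two levels (extension .fastq.gz/.fq.gz first, then read-end _1/_2 on the stripped base) instead of A's flat scan over four fully-combined suffixes.
import Mathlib
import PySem

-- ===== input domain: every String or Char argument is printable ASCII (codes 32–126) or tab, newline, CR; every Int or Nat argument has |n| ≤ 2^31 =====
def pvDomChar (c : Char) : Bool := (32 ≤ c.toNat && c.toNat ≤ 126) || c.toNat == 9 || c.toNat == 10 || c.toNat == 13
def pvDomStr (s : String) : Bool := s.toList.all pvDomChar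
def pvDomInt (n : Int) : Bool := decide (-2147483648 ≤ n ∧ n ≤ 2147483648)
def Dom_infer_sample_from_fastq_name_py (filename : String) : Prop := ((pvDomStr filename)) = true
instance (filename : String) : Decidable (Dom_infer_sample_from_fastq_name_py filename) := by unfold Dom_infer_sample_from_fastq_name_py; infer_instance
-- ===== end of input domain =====

-- B replaces A's flat scan over four fully-combined suffixes by a two-level decomposition
-- (extension first, then read-end on the stripped base); objective: simpler.

-- ===== PORT A =====
-- 'for suffix, read_type in suffixes: if filename.endswith(suffix): return …'
def pvScanA (filename : String) : List (String × String) → Option (String × String)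
  | [] => none
  | (suffix, read_type) :: rest =>
    if PySem.Str.endswith filename suffix then
      some (PySem.Str.slice filename none (some (-(PySem.Str.len suffix : Int))), read_type)
    else pvScanA filename rest

def infer_sample_from_fastq_name_py (filename : String) : Option (String × String) :=
  pvScanA filename
    [("_1.fastq.gz", "R1"), ("_2.fastq.gz", "R2"), ("_1.fq.gz", "R1"), ("_2.fq.gz", "R2")]

-- ===== PORT B =====
-- 'for ext in (".fastq.gz", ".fq.gz"): if filename.endswith(ext): base = …; …'
def pvExtLoopB (filename : String) : List String → Option (String × String)
  | [] => none
  | ext :: rest =>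
    if PySem.Str.endswith filename ext then
      let base := PySem.Str.slice filename none (some (-(PySem.Str.len ext : Int)))
      if PySem.Str.endswith base "_1" then
        some (PySem.Str.slice base none (some (-2)), "R1")
      else if PySem.Str.endswith base "_2" then
        some (PySem.Str.slice base none (some (-2)), "R2")
      else none
    else pvExtLoopB filename rest

def infer_sample_from_fastq_name_py_alt (filename : String) : Option (String × String) :=
  pvExtLoopB filename [".fastq.gz", ".fq.gz"]

-- ===== PRECONDITION & SPEC =====
def Spec_infer_sample_from_fastq_name_py (filename : String) (out : Option (String × String)) : Prop := out = infer_sample_from_fastq_name_py_alt filename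
instance (filename : String) (out : Option (String × String)) : Decidable (Spec_infer_sample_from_fastq_name_py filename out) := by unfold Spec_infer_sample_from_fastq_name_py; infer_instance

-- ===== CLAIM (what is proved, stated in full; the proofs are below) =====
def Claim_equal_infer_sample_from_fastq_name_py : Prop := ∀ (filename : String), Dom_infer_sample_from_fastq_name_py filename → Spec_infer_sample_from_fastq_name_py filename (infer_sample_from_fastq_name_py filename)

-- ===== LEMMAS AND PROOFS =====

-- (p ++ q) is a prefix of l iff p is and q is a prefix of the rest
theorem pvPrefixAppendIff (p q l : List Char) :
    (p ++ q) <+: l ↔ p <+: l ∧ q <+: l.drop p.length := by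
  constructor
  · rintro ⟨t, rfl⟩
    exact ⟨⟨q ++ t, by simp⟩, by simp⟩
  · rintro ⟨⟨t, rfl⟩, hq⟩
    simp at hq
    obtain ⟨u, rfl⟩ := hq
    exact ⟨u, by simp⟩

-- (p ++ q) is a suffix of l iff q is and p is a suffix of l with q stripped
theorem pvSuffixSplit (p q l : List Char) :
    (p ++ q) <:+ l ↔ q <:+ l ∧ p <:+ l.take (l.length - q.length) := by
  rw [← List.reverse_prefix, ← List.reverse_prefix, ← List.reverse_prefix,
      List.reverse_append, List.reverse_take, pvPrefixAppendIff, List.length_reverse]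
  by_cases hq : q.length ≤ l.length
  · rw [Nat.sub_sub_self hq]
  · constructor
    · rintro ⟨h1, h2⟩
      exact absurd (List.IsPrefix.length_le h1) (by simpa using hq)
    · rintro ⟨h1, h2⟩
      exact absurd (List.IsPrefix.length_le h1) (by simpa using hq)

-- stripping 9 then 2 characters from the end equals stripping 11
theorem pvSliceComp (s : String) (h : 11 ≤ s.toList.length) :
    PySem.Str.slice (PySem.Str.slice s none (some (-9))) none (some (-2)) =
      PySem.Str.slice s none (some (-11)) := by
  apply String.toList_inj.mp
  simp only [PySem.Str.toList_slice, PySem.Chars.slice_eq_listSlice]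
  rw [PySem.List.slice_to_neg_ofNat _ 9 (by omega),
      PySem.List.slice_to_neg_ofNat _ 2 (by omega),
      PySem.List.slice_to_neg_ofNat _ 11 (by omega),
      List.take_take, List.length_take]
  congr 1
  omega

theorem pvSliceComp6 (s : String) (h : 8 ≤ s.toList.length) :
    PySem.Str.slice (PySem.Str.slice s none (some (-6))) none (some (-2)) =
      PySem.Str.slice s none (some (-8)) := by
  apply String.toList_inj.mp
  simp only [PySem.Str.toList_slice, PySem.Chars.slice_eq_listSlice]
  rw [PySem.List.slice_to_neg_ofNat _ 6 (by omega),
      PySem.List.slice_to_neg_ofNat _ 2 (by omega),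
      PySem.List.slice_to_neg_ofNat _ 8 (by omega),
      List.take_take, List.length_take]
  congr 1
  omega

-- endswith of the combined suffix ↔ endswith of the extension and of the read-end on the base
theorem pvEndswithBase (filename : String) (ext : String) (k : Nat) (hk : 1 < k)
    (hlen : ext.toList.length = k) (rd : String) :
    PySem.Str.endswith (PySem.Str.slice filename none (some (-(k : Int)))) rd = true ↔
      rd.toList <:+ filename.toList.take (filename.toList.length - k) := by
  rw [PySem.Str.endswith_eq, PySem.Chars.endswith_iff, PySem.Str.toList_slice,
      PySem.Chars.slice_eq_listSlice, PySem.List.slice_to_neg_natCast _ k (by omega)]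

-- two suffixes of the same list: the shorter is a suffix of the longer
theorem pvNotBoth (a b l : List Char) (hab : ¬ a <:+ b) (hba : ¬ b <:+ a)
    (ha : a <:+ l) (hb : b <:+ l) : False := by
  rcases List.suffix_or_suffix_of_suffix ha hb with h | h
  · exact hab h
  · exact hba h

-- endswith of a combined suffix splits into extension and read-end on the base
theorem pvCombined (filename rd ext full : String)
    (hfull : full.toList = rd.toList ++ ext.toList) (k : Nat) (hk : ext.toList.length = k) :
    (PySem.Str.endswith filename full = true) ↔
      (ext.toList <:+ filename.toList ∧
        rd.toList <:+ filename.toList.take (filename.toList.length - k)) := by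
  rw [PySem.Str.endswith_eq, PySem.Chars.endswith_iff, hfull, pvSuffixSplit, hk]

theorem pvExtIff (filename ext : String) :
    (PySem.Str.endswith filename ext = true) ↔ ext.toList <:+ filename.toList := by
  rw [PySem.Str.endswith_eq, PySem.Chars.endswith_iff]

-- ===== VERDICT (by name: the statement is the Claim_ definition above) =====
theorem infer_sample_from_fastq_name_py_spec : Claim_equal_infer_sample_from_fastq_name_py := by
  intro filename _
  unfold Spec_infer_sample_from_fastq_name_py
  unfold infer_sample_from_fastq_name_py infer_sample_from_fastq_name_py_alt
  simp only [pvScanA, pvExtLoopB,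
    show (PySem.Str.len "_1.fastq.gz") = (11:Int) from rfl,
    show (PySem.Str.len "_2.fastq.gz") = (11:Int) from rfl,
    show (PySem.Str.len "_1.fq.gz") = (8:Int) from rfl,
    show (PySem.Str.len "_2.fq.gz") = (8:Int) from rfl,
    show (PySem.Str.len ".fastq.gz") = ((9:Nat):Int) from rfl,
    show (PySem.Str.len ".fq.gz") = ((6:Nat):Int) from rfl,
    pvCombined filename "_1" ".fastq.gz" "_1.fastq.gz" (by decide) 9 (by decide),
    pvCombined filename "_2" ".fastq.gz" "_2.fastq.gz" (by decide) 9 (by decide),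
    pvCombined filename "_1" ".fq.gz" "_1.fq.gz" (by decide) 6 (by decide),
    pvCombined filename "_2" ".fq.gz" "_2.fq.gz" (by decide) 6 (by decide),
    pvExtIff filename ".fastq.gz", pvExtIff filename ".fq.gz",
    pvEndswithBase filename ".fastq.gz" 9 (by omega) (by decide) "_1",
    pvEndswithBase filename ".fastq.gz" 9 (by omega) (by decide) "_2",
    pvEndswithBase filename ".fq.gz" 6 (by omega) (by decide) "_1",
    pvEndswithBase filename ".fq.gz" 6 (by omega) (by decide) "_2"]
  by_cases h9 : ['.', 'f', 'a', 's', 't', 'q', '.', 'g', 'z'] <:+ filename.toList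
  · have hn9 : 9 ≤ filename.length := by
      simpa [String.length_toList] using h9.length_le
    by_cases h1 : ['_', '1'] <:+ List.take (filename.length - 9) filename.toList
    · have hl : 11 ≤ filename.toList.length := by
        have := h1.length_le
        simp [List.length_take, String.length_toList] at this
        simp [String.length_toList]; omega
      simp [h9, h1, pvSliceComp filename hl]
    · by_cases h2 : ['_', '2'] <:+ List.take (filename.length - 9) filename.toList
      · have hl : 11 ≤ filename.toList.length := by
          have := h2.length_le
          simp [List.length_take, String.length_toList] at this
          simp [String.length_toList]; omega
        simp [h9, h1, h2, pvSliceComp filename hl]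
      · have h6 : ¬ ['.', 'f', 'q', '.', 'g', 'z'] <:+ filename.toList := fun h6 =>
          pvNotBoth _ _ _ (by decide) (by decide) h9 h6
        simp [h9, h1, h2, h6]
  · by_cases h6 : ['.', 'f', 'q', '.', 'g', 'z'] <:+ filename.toList
    · by_cases h1 : ['_', '1'] <:+ List.take (filename.length - 6) filename.toList
      · have hl : 8 ≤ filename.toList.length := by
          have := h1.length_le
          simp [List.length_take, String.length_toList] at this
          simp [String.length_toList]; omega
        simp [h9, h6, h1, pvSliceComp6 filename hl]
      · by_cases h2 : ['_', '2'] <:+ List.take (filename.length - 6) filename.toList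
        · have hl : 8 ≤ filename.toList.length := by
            have := h2.length_le
            simp [List.length_take, String.length_toList] at this
            simp [String.length_toList]; omega
          simp [h9, h6, h1, h2, pvSliceComp6 filename hl]
        · simp [h9, h6, h1, h2]
    · simp [h9, h6]
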